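-- pv_equiv track=rewrite | github.com/depthsecurity/armory | armory2/armory_main/apps.py | get_armory_webapps_grouped
-- ===== SOURCE A (Python) =====
-- def get_armory_webapps_grouped(webapps):
--     """
--         Return dictionary of webapps available in Armory grouped by their self-reported category attribute.
--     """
--     webapps_grouped = {}
--     for app, app_data in webapps.items():
--         app_category = app_data['category']
--         if app_category in webapps_grouped:
--             webapps_grouped[app_category].append(app_data)
--         else:
--             webapps_grouped[app_category] = [app_data]
--     return webapps_grouped
-- ===== SOURCE B (Python) =====
-- def get_armory_webapps_grouped(webapps):
--     """
--         Return dictionary of webapps available in Armory grouped by their self-reported category attribute.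
--     """
--     data = list(webapps.values())
--     categories = list(dict.fromkeys(d['category'] for d in data))
--     return {c: [d for d in data if d['category'] == c] for c in categories}
-- ===== Notes on version B (the rewrite author's own statement) =====
-- stated objective: alternative
-- what changed: Replaces A's incremental dict-building loop (lookup/append-or-create per item) with a two-phase comprehension: an ordered dedup of the categories via dict.fromkeys, then one filter pass per category; it trades a single accumulating pass for k filter passes.
import Mathlib
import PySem

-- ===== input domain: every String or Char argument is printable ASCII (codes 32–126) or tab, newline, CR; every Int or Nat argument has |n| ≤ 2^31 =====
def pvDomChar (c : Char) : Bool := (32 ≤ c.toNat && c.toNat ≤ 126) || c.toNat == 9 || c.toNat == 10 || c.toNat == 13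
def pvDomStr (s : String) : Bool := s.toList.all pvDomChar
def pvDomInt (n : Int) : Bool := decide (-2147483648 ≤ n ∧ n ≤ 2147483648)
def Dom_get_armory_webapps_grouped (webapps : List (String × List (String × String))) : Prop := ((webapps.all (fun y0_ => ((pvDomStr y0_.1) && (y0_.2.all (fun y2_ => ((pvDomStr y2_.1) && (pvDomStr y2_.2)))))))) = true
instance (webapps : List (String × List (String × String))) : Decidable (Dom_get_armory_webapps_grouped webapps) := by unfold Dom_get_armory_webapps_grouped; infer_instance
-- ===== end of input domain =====

-- B groups by a different decomposition (ordered dedup of categories, then one filter per category)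
-- instead of A's incremental append-or-create dict loop; same results, no speed claim.

-- Shared decoding of the dict-typed arguments (Python dicts arrive as association lists;
-- PySem.Dict.ofList is the dict(...) constructor: first position, last value wins):
-- app_data['category'] (total form; Pre_ guarantees the key is present)
def pvCat (d : List (String × String)) : String :=
  ((PySem.Dict.ofList d).get? "category").getD ""
-- the app_data dict itself, as the item list of the decoded dict
def pvNorm (d : List (String × String)) : List (String × String) :=
  (PySem.Dict.ofList d).items

-- ===== PORT A =====
-- literal port of A: for app, app_data in webapps.items(): append-or-create under app_data['category']
def get_armory_webapps_grouped (webapps : List (String × List (String × String))) : List (String × List (List (String × String))) :=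
  ((PySem.Dict.ofList webapps).items.foldl
    (fun (g : PySem.Dict String (List (List (String × String)))) p =>
      let app_category := pvCat p.2
      if g.contains app_category then
        g.modify app_category [] (fun v => v ++ [pvNorm p.2])
      else
        g.insert app_category [pvNorm p.2])
    PySem.Dict.empty).items

-- ===== PORT B =====
def get_armory_webapps_grouped_alt (webapps : List (String × List (String × String))) : List (String × List (List (String × String))) :=
  let data := (PySem.Dict.ofList webapps).values
  let categories := PySem.List.dedup (data.map pvCat)
  categories.map (fun c => (c, (data.filter (fun d => pvCat d == c)).map pvNorm))

-- ===== PRECONDITION & SPEC =====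
-- Pre_ excludes exactly the inputs where Python A raises KeyError: some webapp's app_data
-- (after dict decoding) has no 'category' key.
def Pre_get_armory_webapps_grouped (webapps : List (String × List (String × String))) : Prop :=
  ∀ p ∈ (PySem.Dict.ofList webapps).items, (PySem.Dict.ofList p.2).contains "category" = true
instance (webapps : List (String × List (String × String))) : Decidable (Pre_get_armory_webapps_grouped webapps) := by unfold Pre_get_armory_webapps_grouped; infer_instance
def pvWitness_get_armory_webapps_grouped : (List (String × List (String × String))) :=
  [("app1", [("category", "web"), ("name", "a")]), ("app2", [("category", "web")]), ("app3", [("category", "cms")])]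

def Spec_get_armory_webapps_grouped (webapps : List (String × List (String × String))) (out : List (String × List (List (String × String)))) : Prop := out = get_armory_webapps_grouped_alt webapps
instance (webapps : List (String × List (String × String))) (out : List (String × List (List (String × String)))) : Decidable (Spec_get_armory_webapps_grouped webapps out) := by unfold Spec_get_armory_webapps_grouped; infer_instance

-- ===== CLAIM (what is proved, stated in full; the proofs are below) =====
def Claim_equal_get_armory_webapps_grouped : Prop := ∀ (webapps : List (String × List (String × String))), Dom_get_armory_webapps_grouped webapps → Pre_get_armory_webapps_grouped webapps → Spec_get_armory_webapps_grouped webapps (get_armory_webapps_grouped webapps)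

-- ===== LEMMAS AND PROOFS =====

-- A's append-or-create step is exactly a modify with default []
lemma step_eq_modify (g : PySem.Dict String (List (List (String × String)))) (c : String)
    (v : List (String × String)) :
    (if g.contains c then g.modify c [] (fun w => w ++ [pvNorm v]) else g.insert c [pvNorm v])
      = g.modify c [] (fun w => w ++ [pvNorm v]) := by
  by_cases h : g.contains c = true
  · simp [h]
  · simp only [Bool.not_eq_true] at h
    simp [h, PySem.Dict.modify, PySem.Dict.getD_of_not_contains _ _ h]

-- the grouping fold, characterised item-wise over an arbitrary items list
lemma groupA_items (l : List (String × List (String × String))) :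
    (l.foldl
      (fun (g : PySem.Dict String (List (List (String × String)))) p =>
        let app_category := pvCat p.2
        if g.contains app_category then
          g.modify app_category [] (fun v => v ++ [pvNorm p.2])
        else
          g.insert app_category [pvNorm p.2])
      PySem.Dict.empty).items
    = (PySem.List.dedup (l.map (fun p => pvCat p.2))).map
        (fun c => (c, (l.filter (fun p => pvCat p.2 == c)).map (fun p => pvNorm p.2))) := by
  have hfold :
      (l.foldl
        (fun (g : PySem.Dict String (List (List (String × String)))) p =>
          let app_category := pvCat p.2
          if g.contains app_category then
            g.modify app_category [] (fun v => v ++ [pvNorm p.2])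
          else
            g.insert app_category [pvNorm p.2])
        PySem.Dict.empty)
      = (l.foldl
          (fun (g : PySem.Dict String (List (List (String × String)))) p =>
            g.modify (pvCat p.2) [] (fun v => v ++ [pvNorm p.2]))
          PySem.Dict.empty) := by
    exact PySem.List.foldl_congr_mem l _ _ PySem.Dict.empty
      (fun g p _ => step_eq_modify g (pvCat p.2) p.2)
  rw [hfold]
  set D := (l.foldl
      (fun (g : PySem.Dict String (List (List (String × String)))) p =>
        g.modify (pvCat p.2) [] (fun v => v ++ [pvNorm p.2]))
      PySem.Dict.empty) with hD
  have hkeys : D.keys = PySem.Set.ofList (l.map (fun p => pvCat p.2)) := by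
    rw [hD, PySem.Dict.keys_foldl_modify_key l (fun p => pvCat p.2) []
      (fun _ p v => v ++ [pvNorm p.2]) PySem.Dict.empty, PySem.Dict.keys_empty,
      PySem.Set.update_nil_left]
  have hnodup : D.keys.Nodup := by
    rw [hkeys]; exact PySem.Set.nodup_ofList _
  have hgetD : ∀ c, D.getD c [] =
      (l.filter (fun p => pvCat p.2 == c)).map (fun p => pvNorm p.2) := by
    intro c
    have := PySem.Dict.getD_foldl_modify_append
      (l.map (fun p => (pvCat p.2, pvNorm p.2))) PySem.Dict.empty c
    rw [List.foldl_map] at this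
    simpa [List.filter_map, Function.comp, List.map_map, hD] using this
  rw [PySem.Dict.items_eq_map_keys D hnodup [], hkeys, ← PySem.List.dedup_eq_ofList]
  exact List.map_congr_left (fun c _ => by rw [hgetD c])

-- ===== VERDICT (by name: the statement is the Claim_ definition above) =====
theorem get_armory_webapps_grouped_spec : Claim_equal_get_armory_webapps_grouped := by
  intro webapps _ _
  unfold Spec_get_armory_webapps_grouped get_armory_webapps_grouped get_armory_webapps_grouped_alt
  rw [groupA_items]
  have hvals : (PySem.Dict.ofList webapps).values
      = (PySem.Dict.ofList webapps).items.map (fun p => p.2) := rfl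
  simp only [hvals]
  simp [List.map_map, List.filter_map, Function.comp_def]
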